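-- pv_equiv track=rewrite | github.com/lukas-reineke/dotfiles | hypr/next-workspace.py | find_next_id_in_group
-- ===== SOURCE A (Python) =====
-- def find_next_id_in_group(id, id_list):
--     # Determine the group's start and end IDs based on the given ID
--     group_start = ((id - 1) // 10) * 10 + 1
--     group_end = group_start + 9
--
--     # Filter IDs to only those in the same group
--     group_ids = sorted([x for x in id_list if group_start <= x <= group_end])
--
--     # Find the next ID in the group, or loop around if necessary
--     for next_id in group_ids:
--         if next_id > id:
--             return next_id
--     return group_ids[0] if group_ids else None
-- ===== SOURCE B (Python) =====
-- def find_next_id_in_group(id, id_list):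
--     # Determine the group's start and end IDs based on the given ID
--     group_start = ((id - 1) // 10) * 10 + 1
--     group_end = group_start + 9
--
--     # One pass: track smallest in-group id and smallest in-group id above `id`
--     group_min = None
--     next_above = None
--     for x in id_list:
--         if group_start <= x <= group_end:
--             if group_min is None or x < group_min:
--                 group_min = x
--             if x > id and (next_above is None or x < next_above):
--                 next_above = x
--     return next_above if next_above is not None else group_min
-- ===== Notes on version B (the rewrite author's own statement) =====
-- stated objective: simpler
-- what changed: Replaced A's filter+sort+scan-for-first-above (with sorted[0] fallback) by a single pass over id_list tracking two running minima (smallest in-group id and smallest in-group id above id), dropping the sort entirely.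
import Mathlib
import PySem

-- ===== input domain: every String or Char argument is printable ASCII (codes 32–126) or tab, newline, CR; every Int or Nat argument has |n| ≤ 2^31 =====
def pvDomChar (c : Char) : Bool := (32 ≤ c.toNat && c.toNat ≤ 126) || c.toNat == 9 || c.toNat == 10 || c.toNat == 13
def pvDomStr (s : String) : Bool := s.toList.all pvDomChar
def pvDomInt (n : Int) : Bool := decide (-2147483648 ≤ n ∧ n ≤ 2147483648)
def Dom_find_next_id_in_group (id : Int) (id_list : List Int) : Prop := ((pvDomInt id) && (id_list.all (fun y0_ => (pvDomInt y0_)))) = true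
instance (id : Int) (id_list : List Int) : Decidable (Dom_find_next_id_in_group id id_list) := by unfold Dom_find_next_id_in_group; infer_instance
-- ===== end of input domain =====

-- B replaces A's sort-then-scan by a single pass tracking two running minima (no sort); simpler and one pass.

-- ===== PORT A =====
-- the `for next_id in group_ids: if next_id > id: return next_id` loop
def pvALoop (id : Int) : List Int → Option Int
  | [] => none
  | x :: t => if x > id then some x else pvALoop id t

def find_next_id_in_group (id : Int) (id_list : List Int) : Option Int :=
  let group_start := PySem.Int.floordiv (id - 1) 10 * 10 + 1
  let group_end := group_start + 9
  let group_ids := PySem.List.sorted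
    (id_list.filter (fun x => decide (group_start ≤ x) && decide (x ≤ group_end)))
    (fun x => x) false
  match pvALoop id group_ids with
  | some v => some v
  | none => group_ids.head?    -- group_ids[0] if group_ids else None

-- ===== PORT B =====
-- one step of B's loop body over (group_min, next_above)
def pvBStep (id group_start group_end : Int) (acc : Option Int × Option Int) (x : Int) :
    Option Int × Option Int :=
  if decide (group_start ≤ x) && decide (x ≤ group_end) then
    (match acc.1 with
      | none => some x
      | some m => if x < m then some x else some m,
     if x > id then
       match acc.2 with
       | none => some x
       | some n => if x < n then some x else some n
     else acc.2)
  else acc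

def find_next_id_in_group_alt (id : Int) (id_list : List Int) : Option Int :=
  let group_start := PySem.Int.floordiv (id - 1) 10 * 10 + 1
  let group_end := group_start + 9
  let p := id_list.foldl (pvBStep id group_start group_end) (none, none)
  match p.2 with
  | some v => some v
  | none => p.1

-- ===== PRECONDITION & SPEC =====
def Spec_find_next_id_in_group (id : Int) (id_list : List Int) (out : Option Int) : Prop := out = find_next_id_in_group_alt id id_list
instance (id : Int) (id_list : List Int) (out : Option Int) : Decidable (Spec_find_next_id_in_group id id_list out) := by unfold Spec_find_next_id_in_group; infer_instance

-- ===== CLAIM (what is proved, stated in full; the proofs are below) =====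
def Claim_equal_find_next_id_in_group : Prop := ∀ (id : Int) (id_list : List Int), Dom_find_next_id_in_group id id_list → Spec_find_next_id_in_group id id_list (find_next_id_in_group id id_list)

-- ===== LEMMAS AND PROOFS =====

/-- minimum of two optional ints (none = absent). -/
def optMin : Option Int → Option Int → Option Int
  | none, o => o
  | some a, none => some a
  | some a, some b => some (min a b)

/-- minimum element of a list, none if empty. -/
def mins : List Int → Option Int
  | [] => none
  | x :: t => optMin (some x) (mins t)

theorem optMin_none_right (o : Option Int) : optMin o none = o := by
  cases o <;> rfl

theorem optMin_assoc (a b c : Option Int) : optMin (optMin a b) c = optMin a (optMin b c) := by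
  cases a <;> cases b <;> cases c <;> simp [optMin, min_assoc]

theorem mins_eq_none {l : List Int} : mins l = none ↔ l = [] := by
  cases l with
  | nil => simp [mins]
  | cons x t => simp [mins]; cases mins t <;> simp [optMin]

theorem mins_mem_le {l : List Int} {v : Int} (h : mins l = some v) :
    v ∈ l ∧ ∀ y ∈ l, v ≤ y := by
  induction l generalizing v with
  | nil => simp [mins] at h
  | cons x t ih =>
    simp only [mins] at h
    cases ht : mins t with
    | none =>
      rw [ht] at h; simp [optMin] at h; subst h
      have h0 := mins_eq_none.mp ht; subst h0
      simp
    | some w =>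
      rw [ht] at h; simp only [optMin, Option.some.injEq] at h
      obtain ⟨hw, hle⟩ := ih ht
      subst h
      constructor
      · rcases le_total x w with hxw | hwx
        · simp [min_eq_left hxw]
        · rw [min_eq_right hwx]; exact List.mem_cons_of_mem _ hw
      · intro y hy
        rcases List.mem_cons.mp hy with rfl | hy
        · exact min_le_left _ _
        · exact le_trans (min_le_right x w) (hle y hy)

theorem mins_of_mem_le {l : List Int} {v : Int} (hm : v ∈ l) (hle : ∀ y ∈ l, v ≤ y) :
    mins l = some v := by
  induction l with
  | nil => simp at hm
  | cons x t ih =>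
    simp only [mins]
    rcases List.mem_cons.mp hm with rfl | hv
    · cases ht : mins t with
      | none => rfl
      | some w =>
        have hw := (mins_mem_le ht).1
        have : v ≤ w := hle w (List.mem_cons_of_mem _ hw)
        simp [optMin, min_eq_left this]
    · have := ih hv (fun y hy => hle y (List.mem_cons_of_mem _ hy))
      rw [this]
      have hxv : v ≤ x := hle x (List.mem_cons_self)
      simp [optMin, min_eq_right hxv]

theorem mins_perm {l₁ l₂ : List Int} (h : l₁.Perm l₂) : mins l₁ = mins l₂ := by
  cases h1 : mins l₁ with
  | none =>
    have := mins_eq_none.mp h1; subst this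
    have : l₂ = [] := h.nil_eq.symm
    simp [this, mins]
  | some v =>
    obtain ⟨hm, hle⟩ := mins_mem_le h1
    exact (mins_of_mem_le (h.mem_iff.mp hm) (fun y hy => hle y (h.mem_iff.mpr hy))).symm

/-- The update inside B's loop is `optMin` with the new element. -/
theorem bupdate_eq (o : Option Int) (x : Int) :
    (match o with
      | none => some x
      | some m => if x < m then some x else some m) = optMin o (some x) := by
  cases o with
  | none => rfl
  | some m =>
    simp only [optMin]
    by_cases h : x < m
    · simp [h, min_eq_right (le_of_lt h)]
    · simp [h, min_eq_left (not_lt.mp h)]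

/-- B's fold computes the minima of the two filtered lists. -/
theorem fold_spec (id gs ge : Int) (l : List Int) (m n : Option Int) :
    l.foldl (pvBStep id gs ge) (m, n) =
      (optMin m (mins (l.filter (fun x => decide (gs ≤ x) && decide (x ≤ ge)))),
       optMin n (mins (l.filter (fun x => (decide (gs ≤ x) && decide (x ≤ ge)) && decide (id < x))))) := by
  induction l generalizing m n with
  | nil => simp [mins, optMin_none_right]
  | cons x t ih =>
    simp only [List.foldl_cons]
    by_cases hp : (decide (gs ≤ x) && decide (x ≤ ge)) = true
    · by_cases hq : id < x
      · have hstep : pvBStep id gs ge (m, n) x = (optMin m (some x), optMin n (some x)) := by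
          simp only [pvBStep, hp, if_true]
          rw [if_pos (show x > id from hq), bupdate_eq, bupdate_eq]
        rw [hstep, ih]
        simp [hp, hq, mins, optMin_assoc]
      · have hstep : pvBStep id gs ge (m, n) x = (optMin m (some x), n) := by
          simp only [pvBStep, hp, if_true]
          rw [if_neg (show ¬ x > id from hq), bupdate_eq]
        rw [hstep, ih]
        simp [hp, hq, mins, optMin_assoc]
    · have hstep : pvBStep id gs ge (m, n) x = (m, n) := by simp [pvBStep, hp]
      have hp' : (fun x => decide (gs ≤ x) && decide (x ≤ ge)) x = false := by
        simpa using hp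
      rw [hstep, ih]
      simp [hp']

/-- On a ≤-sorted list, A's first-above scan finds the minimum of the >id elements. -/
theorem aLoop_sorted (id : Int) (s : List Int) (hs : s.Pairwise (· ≤ ·)) :
    pvALoop id s = mins (s.filter (fun x => decide (id < x))) := by
  induction s with
  | nil => rfl
  | cons x t ih =>
    have hx : ∀ y ∈ t, x ≤ y := fun y hy => (List.pairwise_cons.mp hs).1 y hy
    have ht := (List.pairwise_cons.mp hs).2
    by_cases h : id < x
    · simp only [pvALoop, show (x > id) = (id < x) from rfl, if_pos h, List.filter_cons,
        decide_eq_true h, if_true, mins]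
      cases hm : mins (t.filter (fun x => decide (id < x))) with
      | none => rfl
      | some w =>
        have hw := (mins_mem_le hm).1
        have : x ≤ w := hx w (List.mem_of_mem_filter hw)
        simp [optMin, min_eq_left this]
    · simp only [pvALoop, show (x > id) = (id < x) from rfl, if_neg h, List.filter_cons]
      rw [ih ht]
      simp [h]

/-- head of a ≤-sorted list is its minimum. -/
theorem head_sorted_eq_mins (s : List Int) (hs : s.Pairwise (· ≤ ·)) : s.head? = mins s := by
  cases s with
  | nil => rfl
  | cons x t =>
    have hx : ∀ y ∈ x :: t, x ≤ y := by
      intro y hy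
      rcases List.mem_cons.mp hy with rfl | hy
      · exact le_refl _
      · exact (List.pairwise_cons.mp hs).1 y hy
    simp [List.head?, (mins_of_mem_le (List.mem_cons_self) hx).symm]

-- ===== VERDICT (by name: the statement is the Claim_ definition above) =====
theorem find_next_id_in_group_spec : Claim_equal_find_next_id_in_group := by
  intro id id_list _
  unfold Spec_find_next_id_in_group find_next_id_in_group find_next_id_in_group_alt
  simp only []
  set gs := PySem.Int.floordiv (id - 1) 10 * 10 + 1 with hgs
  set ge := gs + 9 with hge
  set P : Int → Bool := fun x => decide (gs ≤ x) && decide (x ≤ ge) with hP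
  set fl := id_list.filter P with hfl
  set s := PySem.List.sorted fl (fun x => x) false with hs
  have hpair : s.Pairwise (· ≤ ·) := by
    simpa using PySem.List.sorted_pairwise (xs := fl) (key := fun x => x)
  have hperm : s.Perm fl := PySem.List.sorted_perm fl (fun x => x) false
  rw [fold_spec]
  simp only [optMin]
  rw [aLoop_sorted id s hpair]
  have hfq : (id_list.filter (fun x => P x && decide (id < x))) =
      fl.filter (fun x => decide (id < x)) := by
    rw [hfl, List.filter_filter]
    exact List.filter_congr (fun x _ => Bool.and_comm _ _)
  rw [hfq]
  have hpermf : (s.filter (fun x => decide (id < x))).Perm (fl.filter (fun x => decide (id < x))) :=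
    hperm.filter _
  rw [mins_perm hpermf]
  cases hm : mins (fl.filter (fun x => decide (id < x))) with
  | some v => rfl
  | none =>
    simp only []
    rw [head_sorted_eq_mins s hpair, mins_perm hperm]
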